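-- pv_equiv track=rewrite | github.com/Aasthaengg/IBMdataset | Python_codes/p02781/s577556284.py | case_k2
-- ===== SOURCE A (Python) =====
-- def case_k1(n):
--     digit = len(str(n))
--     if digit ==1:
--         return n
--     else:
--         return (n//(10**(digit-1))+(digit-1)*9)
--
-- def case_k2(n):
--     digit = len(str(n))
--     if digit == 1:
--         return 0
--     elif digit ==2:
--         return (n//10-1)*9+n%10
--     else:
--         sum = 0
--         for i in range(1,digit-1):
--             sum += i*81
--         q = n//(10**(digit-1))
--         r = n-q*10**(digit-1)
--         r_digit = len(str(r))
--         sum += (q-1)*(case_k1(10**(digit-1)-1)) + case_k1(r)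
--         return sum
-- ===== SOURCE B (Python) =====
-- def case_k2(n):
--     d = len(str(n))
--     if d == 1:
--         return 0
--     p = 10 ** (d - 1)
--     q = n // p
--     r = n % p
--     rd = len(str(r))
--     return 81 * (d - 1) * (d - 2) // 2 + (q - 1) * 9 * (d - 1) + r // 10 ** (rd - 1) + 9 * (rd - 1)
-- ===== Notes on version B (the rewrite author's own statement) =====
-- stated objective: simpler
-- what changed: replaced the accumulation loop over digit positions, the separate two-digit branch and both case_k1 helper calls by one closed-form arithmetic expression in the digit count, leading digit and remainder
import Mathlib
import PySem

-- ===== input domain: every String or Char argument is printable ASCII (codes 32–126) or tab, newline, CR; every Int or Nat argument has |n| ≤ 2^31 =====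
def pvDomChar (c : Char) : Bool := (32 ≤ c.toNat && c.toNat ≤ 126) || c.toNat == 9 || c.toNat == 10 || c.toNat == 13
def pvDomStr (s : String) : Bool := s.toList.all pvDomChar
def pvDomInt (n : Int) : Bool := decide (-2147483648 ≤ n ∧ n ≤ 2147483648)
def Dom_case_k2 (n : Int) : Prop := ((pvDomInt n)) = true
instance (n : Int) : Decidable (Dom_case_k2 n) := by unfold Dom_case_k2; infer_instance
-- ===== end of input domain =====

-- B replaces A's accumulation loop, extra two-digit branch and case_k1 helper calls
-- by one closed-form arithmetic expression (objective: simpler).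

-- ===== PORT A =====
-- exponents digit-1 are ≥ 0 because len(str(n)) ≥ 1, so .toNat on them is exact
def case_k1 (n : Int) : Int :=
  let digit : Int := (PySem.Int.toStr n).length
  if digit = 1 then n
  else PySem.Int.floordiv n (10 ^ (digit - 1).toNat) + (digit - 1) * 9

def case_k2 (n : Int) : Int :=
  let digit : Int := (PySem.Int.toStr n).length
  if digit = 1 then 0
  else if digit = 2 then (PySem.Int.floordiv n 10 - 1) * 9 + PySem.Int.mod n 10
  else
    let s : Int := (PySem.List.pyRange 1 (digit - 1) 1).foldl (fun acc i => acc + i * 81) 0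
    let q : Int := PySem.Int.floordiv n (10 ^ (digit - 1).toNat)
    let r : Int := n - q * 10 ^ (digit - 1).toNat
    let _r_digit : Int := (PySem.Int.toStr r).length  -- computed but unused in A
    s + (q - 1) * case_k1 (10 ^ (digit - 1).toNat - 1) + case_k1 r

-- ===== PORT B =====
def case_k2_alt (n : Int) : Int :=
  let d : Int := (PySem.Int.toStr n).length
  if d = 1 then 0
  else
    let p : Int := 10 ^ (d - 1).toNat
    let q : Int := PySem.Int.floordiv n p
    let r : Int := PySem.Int.mod n p
    let rd : Int := (PySem.Int.toStr r).length
    PySem.Int.floordiv (81 * (d - 1) * (d - 2)) 2 + (q - 1) * 9 * (d - 1)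
      + PySem.Int.floordiv r (10 ^ (rd - 1).toNat) + 9 * (rd - 1)

-- ===== PRECONDITION & SPEC =====
def Spec_case_k2 (n : Int) (out : Int) : Prop := out = case_k2_alt n
instance (n : Int) (out : Int) : Decidable (Spec_case_k2 n out) := by unfold Spec_case_k2; infer_instance

-- ===== CLAIM (what is proved, stated in full; the proofs are below) =====
def Claim_equal_case_k2 : Prop := ∀ (n : Int), Dom_case_k2 n → Spec_case_k2 n (case_k2 n)

-- ===== LEMMAS AND PROOFS =====

-- Nat.toDigits is never empty
lemma pv_toDigits_len_pos (b m : Nat) : 1 ≤ (Nat.toDigits b m).length := by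
  by_cases h : m / b = 0
  · simp [Nat.toDigits, Nat.toDigitsCore, h]
  · simp only [Nat.toDigits, Nat.toDigitsCore, h]
    norm_num
    rw [Nat.toDigitsCore_lens_eq]
    omega

lemma pv_toStr_len_pos (n : Int) : 1 ≤ (PySem.Int.toStr n).length := by
  unfold PySem.Int.toStr PySem.Int.toChars
  split
  · simp only [String.length_ofList, List.length_cons]
    omega
  · simp only [String.length_ofList]
    exact pv_toDigits_len_pos 10 _

lemma pv_toStr_len_le_11 (n : Int) (h : -2147483648 ≤ n ∧ n ≤ 2147483648) :
    (PySem.Int.toStr n).length ≤ 11 := by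
  unfold PySem.Int.toStr PySem.Int.toChars
  have hd : ∀ m : Nat, m ≤ 2147483648 → (Nat.toDigits 10 m).length ≤ 10 := by
    intro m hm
    exact Nat.toDigits_length 10 m 10 (by norm_num) (by norm_num; omega)
  split
  · have h1 : n.natAbs ≤ 2147483648 := by omega
    have := hd n.natAbs h1
    simp only [String.length_ofList, List.length_cons]
    omega
  · have h1 : n.toNat ≤ 2147483648 := by omega
    have := hd n.toNat h1
    simp only [String.length_ofList]
    omega

-- the empty range
lemma pv_pyRange_self (a : Int) : PySem.List.pyRange a a 1 = [] := by
  simp [PySem.List.pyRange]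

lemma pv_pyRange_single (m : Int) : PySem.List.pyRange m (m + 1) 1 = [m] := by
  rw [PySem.List.pyRange_one_cons (by omega)]
  rw [pv_pyRange_self]

-- closed form of A's loop: twice the sum over range(1, m) of 81*i
lemma pv_loop_sum (m : Int) (hm : 0 ≤ m) :
    2 * ((PySem.List.pyRange 1 m 1).foldl (fun acc i => acc + i * 81) 0) = 81 * m * (m - 1) := by
  obtain ⟨k, rfl⟩ := Int.eq_ofNat_of_zero_le hm
  induction k with
  | zero => norm_num [PySem.List.pyRange]
  | succ k ih =>
    have hcast : ((k + 1 : Nat) : Int) = (k : Int) + 1 := by push_cast; ring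
    rw [hcast]
    by_cases hk : k = 0
    · subst hk
      norm_num [pv_pyRange_self 1]
    · have h1 : (1:Int) ≤ (k : Int) := by omega
      rw [PySem.List.pyRange_one_append 1 (k : Int) ((k : Int) + 1) h1 (by omega),
        pv_pyRange_single, List.foldl_append]
      simp only [List.foldl]
      have ihs := ih (by positivity)
      nlinarith [ihs]

-- case_k1 as a closed form in the digit count of its argument
lemma pv_case_k1_eq (r : Int) :
    case_k1 r = PySem.Int.floordiv r (10 ^ ((((PySem.Int.toStr r).length : Int)) - 1).toNat)
      + 9 * (((PySem.Int.toStr r).length : Int) - 1) := by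
  unfold case_k1
  by_cases h : (((PySem.Int.toStr r).length : Int)) = 1
  · simp only [h]
    norm_num [PySem.Int.floordiv, Int.fdiv_one]
  · simp only [h]
    simp
    ring

-- fmod agrees with A's  n - (n // p) * p
lemma pv_fmod_eq (n p : Int) : PySem.Int.mod n p = n - PySem.Int.floordiv n p * p := by
  unfold PySem.Int.mod PySem.Int.floordiv
  have := Int.mul_fdiv_add_fmod n p
  linarith

-- values of case_k1 at the all-nines numbers that A can reach on Dom
lemma pv_case_k1_nines (d : Int) (h3 : 3 ≤ d) (h11 : d ≤ 11) :
    case_k1 ((10:Int) ^ (d - 1).toNat - 1) = 9 * (d - 1) := by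
  interval_cases d <;> decide

-- one-digit strings of the remainders 0..9
lemma pv_small_len (r : Int) (h0 : 0 ≤ r) (h10 : r < 10) :
    (((PySem.Int.toStr r).length : Int)) = 1 := by
  interval_cases r <;> decide

-- ===== VERDICT (by name: the statement is the Claim_ definition above) =====
theorem case_k2_spec : Claim_equal_case_k2 := by
  intro n hdom
  unfold Spec_case_k2
  unfold Dom_case_k2 pvDomInt at hdom
  have hb : -2147483648 ≤ n ∧ n ≤ 2147483648 := by simpa using hdom
  have h1 := pv_toStr_len_pos n
  have h11 := pv_toStr_len_le_11 n hb
  unfold case_k2 case_k2_alt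
  set L : Nat := (PySem.Int.toStr n).length with hL
  by_cases hd1 : ((L : Int)) = 1
  · simp [hd1]
  · simp only [hd1]
    by_cases hd2 : ((L : Int)) = 2
    · -- two-digit branch of A vs B's general formula
      simp only [hd2]
      have hp : (10:Int) ^ ((2:Int) - 1).toNat = 10 := by norm_num
      have hfe : PySem.Int.mod n 10 = n % 10 := by
        unfold PySem.Int.mod
        rw [Int.fmod_eq_emod]
        norm_num
      have hr0 : 0 ≤ PySem.Int.mod n 10 := by
        rw [hfe]; exact Int.emod_nonneg n (by norm_num)
      have hr10 : PySem.Int.mod n 10 < 10 := by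
        rw [hfe]; exact Int.emod_lt_of_pos n (by norm_num)
      rw [hp]
      rw [pv_small_len _ hr0 hr10]
      simp only [PySem.Int.floordiv]
      norm_num
    · -- general branch, 3 ≤ d ≤ 11
      simp only [hd2]
      have h3 : 3 ≤ ((L : Int)) := by omega
      have h11' : ((L : Int)) ≤ 11 := by exact_mod_cast h11
      -- the loop
      have hs := pv_loop_sum ((L : Int) - 1) (by omega)
      have hsum :
          PySem.Int.floordiv (81 * ((L : Int) - 1) * ((L : Int) - 2)) 2
            = (PySem.List.pyRange 1 ((L : Int) - 1) 1).foldl (fun acc i => acc + i * 81) 0 := by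
        have : 81 * ((L : Int) - 1) * ((L : Int) - 2)
            = 2 * ((PySem.List.pyRange 1 ((L : Int) - 1) 1).foldl (fun acc i => acc + i * 81) 0) := by
          rw [hs]; ring
        rw [this]
        unfold PySem.Int.floordiv
        exact Int.mul_fdiv_cancel_left _ (by norm_num)
      -- the remainder
      have hrem : PySem.Int.mod n ((10:Int) ^ (((L : Int)) - 1).toNat)
          = n - PySem.Int.floordiv n ((10:Int) ^ (((L : Int)) - 1).toNat)
              * (10:Int) ^ (((L : Int)) - 1).toNat := pv_fmod_eq n _
      rw [hsum, hrem, pv_case_k1_nines _ h3 h11', pv_case_k1_eq]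
      ring_nf
      simp
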